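-- pv_equiv track=rewrite | github.com/zarify/advent_of_code | 2024/20/20.py | calc_offsets
-- ===== SOURCE A (Python) =====
-- def calc_offsets(d):
--     offsets = set()
--     for x in range(0, d + 1):
--         for y in range(0, d + 1):
--             cost = abs(x) + abs(y)
--             if cost > d or (x == 0 and y == 0):
--                 continue
--             offsets.add((-x, y, cost))
--             offsets.add((x, y, cost))
--             offsets.add((-x, -y, cost))
--             offsets.add((x, -y, cost))
--     return offsets
-- ===== SOURCE B (Python) =====
-- def calc_offsets(d):
--     rows = []
--     for x in range(d + 1):
--         b = d - x
--         if x == 0: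
--             row = [t for y in range(1, b + 1) for t in ((0, y, y), (0, -y, y))]
--         else:
--             row = [(-x, 0, x), (x, 0, x)] + [
--                 t for y in range(1, b + 1)
--                 for t in ((-x, y, x + y), (x, y, x + y), (-x, -y, x + y), (x, -y, x + y))
--             ]
--         rows += row
--     return set(rows)
-- ===== Notes on version B (the rewrite author's own statement) =====
-- stated objective: simpler
-- what changed: A scans the full (d+1)x(d+1) square, skips cells with cost>d via continue, and pushes four mirrored tuples per cell into a set that silently swallows the axis duplicates; B enumerates the Manhattan diamond row by row with the inner range bounded by the remaining budget d-x and emits each offset exactly once (explicit axis cases), so no dedup work is needed.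
import Mathlib
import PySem

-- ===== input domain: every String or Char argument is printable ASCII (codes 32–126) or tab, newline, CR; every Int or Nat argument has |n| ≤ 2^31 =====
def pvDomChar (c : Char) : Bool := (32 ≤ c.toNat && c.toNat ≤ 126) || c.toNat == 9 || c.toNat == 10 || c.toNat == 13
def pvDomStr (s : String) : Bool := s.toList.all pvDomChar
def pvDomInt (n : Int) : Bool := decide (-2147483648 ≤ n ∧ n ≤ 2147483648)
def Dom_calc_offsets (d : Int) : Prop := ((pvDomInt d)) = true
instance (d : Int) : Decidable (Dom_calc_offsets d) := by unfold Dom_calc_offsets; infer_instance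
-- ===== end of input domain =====

-- B replaces A's clipped-square scan with set dedup by a direct, duplicate-free row-by-row
-- enumeration of the Manhattan diamond (budget-limited inner range, explicit axis cases); objective: simpler.

-- ===== PORT A =====
-- A: nested loops over the full square [0,d]×[0,d], 'continue' on cost>d or the origin,
-- four mirrored set.add's per cell (duplicates swallowed by the set).
def stepIA (d x : Int) (offsets : List (Int × Int × Int)) (y : Int) : List (Int × Int × Int) :=
  let cost := |x| + |y|
  if cost > d ∨ (x = 0 ∧ y = 0) then offsets
  else PySem.Set.add (PySem.Set.add (PySem.Set.add
         (PySem.Set.add offsets (-x, y, cost)) (x, y, cost)) (-x, -y, cost)) (x, -y, cost)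

def stepOA (d : Int) (offsets : List (Int × Int × Int)) (x : Int) : List (Int × Int × Int) :=
  (PySem.List.pyRange 0 (d + 1) 1).foldl (stepIA d x) offsets

def calc_offsets (d : Int) : List (Int × Int × Int) :=
  (PySem.List.pyRange 0 (d + 1) 1).foldl (stepOA d) PySem.Set.empty

-- ===== PORT B =====
-- B: for each x the row of the diamond, already without duplicates (axis cases explicit,
-- inner range bounded by the remaining budget b = d - x), rows concatenated, set() at the end.
def altRow (d x : Int) : List (Int × Int × Int) :=
  let b := d - x
  if x = 0 then
    (PySem.List.pyRange 1 (b + 1) 1).flatMap (fun y => [(0, y, y), (0, -y, y)])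
  else
    [(-x, 0, x), (x, 0, x)] ++
      (PySem.List.pyRange 1 (b + 1) 1).flatMap (fun y =>
        [(-x, y, x + y), (x, y, x + y), (-x, -y, x + y), (x, -y, x + y)])

def calc_offsets_alt (d : Int) : List (Int × Int × Int) :=
  PySem.Set.ofList ((PySem.List.pyRange 0 (d + 1) 1).foldl (fun rows x => rows ++ altRow d x) [])

-- ===== PRECONDITION & SPEC =====
def Spec_calc_offsets (d : Int) (out : List (Int × Int × Int)) : Prop := out = calc_offsets_alt d
instance (d : Int) (out : List (Int × Int × Int)) : Decidable (Spec_calc_offsets d out) := by unfold Spec_calc_offsets; infer_instance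

-- ===== CLAIM (what is proved, stated in full; the proofs are below) =====
def Claim_equal_calc_offsets : Prop := ∀ (d : Int), Dom_calc_offsets d → Spec_calc_offsets d (calc_offsets d)

-- ===== LEMMAS AND PROOFS =====

-- the cell group A's four adds contribute at (x, y), written without the swallowed duplicates
def grpA (d x y : Int) : List (Int × Int × Int) :=
  if |x| + |y| > d ∨ (x = 0 ∧ y = 0) then []
  else if x = 0 then [(0, y, y), (0, -y, y)]
  else if y = 0 then [(-x, 0, x), (x, 0, x)]
  else [(-x, y, x + y), (x, y, x + y), (-x, -y, x + y), (x, -y, x + y)]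

def rowA (d x : Int) : List (Int × Int × Int) :=
  (PySem.List.pyRange 0 (d + 1) 1).flatMap (grpA d x)

lemma stepIA_eq (d x : Int) (s : List (Int × Int × Int)) (y : Int) :
    stepIA d x s y =
      if |x| + |y| > d ∨ (x = 0 ∧ y = 0) then s
      else PySem.Set.add (PySem.Set.add (PySem.Set.add
             (PySem.Set.add s (-x, y, |x| + |y|)) (x, y, |x| + |y|)) (-x, -y, |x| + |y|))
             (x, -y, |x| + |y|) := rfl

lemma mem_grpA {d x y : Int} (hx : 0 ≤ x) (hy : 0 ≤ y) {p : Int × Int × Int}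
    (hp : p ∈ grpA d x y) : |p.1| = x ∧ |p.2.1| = y := by
  unfold grpA at hp
  split_ifs at hp with h1 h2 h3
  · simp at hp
  · simp only [List.mem_cons, List.not_mem_nil, or_false] at hp
    rcases hp with hp | hp <;> subst hp <;> subst h2 <;>
      exact ⟨by simp, by simp [abs_of_nonneg hy]⟩
  · simp only [List.mem_cons, List.not_mem_nil, or_false] at hp
    rcases hp with hp | hp <;> subst hp <;> subst h3 <;>
      exact ⟨by simp [abs_of_nonneg hx], by simp⟩
  · simp only [List.mem_cons, List.not_mem_nil, or_false] at hp
    rcases hp with hp | hp | hp | hp <;> subst hp <;>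
      exact ⟨by simp [abs_of_nonneg hx], by simp [abs_of_nonneg hy]⟩

lemma stepIA_fresh (d x y : Int) (hx : 0 ≤ x) (hy : 0 ≤ y)
    (s : List (Int × Int × Int))
    (hs : ∀ p ∈ s, |p.1| = x → |p.2.1| ≠ y) :
    stepIA d x s y = s ++ grpA d x y := by
  rw [stepIA_eq]
  unfold grpA
  by_cases hc : |x| + |y| > d ∨ (x = 0 ∧ y = 0)
  · simp [hc]
  · rw [if_neg hc, if_neg hc]
    have habsy : |y| = y := abs_of_nonneg hy
    have habsx : |x| = x := abs_of_nonneg hx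
    have hfresh : ∀ a b c' : Int, |a| = x → |b| = y → (a, b, c') ∉ s := by
      intro a b c' ha hb hmem
      exact hs _ hmem (by simpa using ha) (by simpa using hb)
    by_cases hx0 : x = 0
    · subst hx0
      have hy0 : y ≠ 0 := fun h => (not_or.mp hc).2 ⟨rfl, h⟩
      have hypos : 0 < y := lt_of_le_of_ne hy (Ne.symm hy0)
      rw [if_pos rfl]
      simp only [abs_zero, zero_add, habsy, neg_zero]
      have hA : ((0 : Int), y, y) ∉ s := hfresh 0 y y (by simp) habsy
      have hB : ((0 : Int), -y, y) ∉ s := hfresh 0 (-y) y (by simp) (by simp [habsy])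
      rw [PySem.Set.add_of_not_mem hA]
      rw [PySem.Set.add_of_mem (show ((0:Int), y, y) ∈ s ++ [((0:Int), y, y)] by simp)]
      rw [PySem.Set.add_of_not_mem (show ((0:Int), -y, y) ∉ s ++ [((0:Int), y, y)] by
        simp only [List.mem_append, List.mem_singleton, not_or]
        exact ⟨hB, by simp [Prod.ext_iff]; omega⟩)]
      rw [PySem.Set.add_of_mem (show ((0:Int), -y, y) ∈ (s ++ [((0:Int), y, y)]) ++ [((0:Int), -y, y)] by simp)]
      simp
    · rw [if_neg hx0]
      have hxpos : 0 < x := lt_of_le_of_ne hx (Ne.symm hx0)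
      by_cases hy0 : y = 0
      · subst hy0
        rw [if_pos rfl]
        simp only [abs_zero, add_zero, habsx, neg_zero]
        have hA : ((-x : Int), 0, x) ∉ s := hfresh (-x) 0 x (by simp [habsx]) (by simp)
        have hB : ((x : Int), 0, x) ∉ s := hfresh x 0 x habsx (by simp)
        rw [PySem.Set.add_of_not_mem hA]
        rw [PySem.Set.add_of_not_mem (show ((x:Int), 0, x) ∉ s ++ [((-x:Int), 0, x)] by
          simp only [List.mem_append, List.mem_singleton, not_or]
          exact ⟨hB, by simp [Prod.ext_iff]; omega⟩)]
        rw [PySem.Set.add_of_mem (show ((-x:Int), 0, x) ∈ (s ++ [((-x:Int), 0, x)]) ++ [((x:Int), 0, x)] by simp)]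
        rw [PySem.Set.add_of_mem (show ((x:Int), 0, x) ∈ (s ++ [((-x:Int), 0, x)]) ++ [((x:Int), 0, x)] by simp)]
        simp
      · rw [if_neg hy0]
        have hypos : 0 < y := lt_of_le_of_ne hy (Ne.symm hy0)
        simp only [habsx, habsy]
        have h1 : ((-x : Int), y, x + y) ∉ s := hfresh (-x) y (x + y) (by simp [habsx]) habsy
        have h2 : ((x : Int), y, x + y) ∉ s := hfresh x y (x + y) habsx habsy
        have h3 : ((-x : Int), -y, x + y) ∉ s := hfresh (-x) (-y) (x + y) (by simp [habsx]) (by simp [habsy])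
        have h4 : ((x : Int), -y, x + y) ∉ s := hfresh x (-y) (x + y) habsx (by simp [habsy])
        rw [PySem.Set.add_of_not_mem h1]
        rw [PySem.Set.add_of_not_mem (show ((x:Int), y, x + y) ∉ s ++ [((-x:Int), y, x + y)] by
          simp only [List.mem_append, List.mem_singleton, not_or]
          exact ⟨h2, by simp [Prod.ext_iff]; omega⟩)]
        rw [PySem.Set.add_of_not_mem (show ((-x:Int), -y, x + y) ∉ (s ++ [((-x:Int), y, x + y)]) ++ [((x:Int), y, x + y)] by
          simp only [List.mem_append, List.mem_singleton, not_or]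
          exact ⟨⟨h3, by simp [Prod.ext_iff]; omega⟩, by simp [Prod.ext_iff]; omega⟩)]
        rw [PySem.Set.add_of_not_mem (show ((x:Int), -y, x + y) ∉ ((s ++ [((-x:Int), y, x + y)]) ++ [((x:Int), y, x + y)]) ++ [((-x:Int), -y, x + y)] by
          simp only [List.mem_append, List.mem_singleton, not_or]
          exact ⟨⟨⟨h4, by simp [Prod.ext_iff]; omega⟩, by simp [Prod.ext_iff]; omega⟩, by simp [Prod.ext_iff]; omega⟩)]
        simp

lemma innerA (d x : Int) (hx : 0 ≤ x) :
    ∀ (ys : List Int) (s : List (Int × Int × Int)),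
      (∀ y ∈ ys, 0 ≤ y) → ys.Nodup →
      (∀ p ∈ s, |p.1| = x → |p.2.1| ∉ ys) →
      ys.foldl (stepIA d x) s = s ++ ys.flatMap (grpA d x)
  | [], s, _, _, _ => by simp
  | y :: t, s, hnn, hnd, hs => by
    have hy : 0 ≤ y := hnn y (by simp)
    have hstep : stepIA d x s y = s ++ grpA d x y := by
      apply stepIA_fresh d x y hx hy
      intro p hp h1 h2
      exact hs p hp h1 (by simp [h2])
    rw [List.foldl_cons, hstep, List.flatMap_cons, ← List.append_assoc]
    apply innerA d x hx t
    · exact fun z hz => hnn z (by simp [hz])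
    · exact hnd.of_cons
    · intro p hp h1
      rcases List.mem_append.mp hp with hp | hp
      · intro hmem
        exact hs p hp h1 (by simp [hmem])
      · rw [(mem_grpA hx hy hp).2]
        exact (List.nodup_cons.mp hnd).1

lemma mem_rowA {d x : Int} (hx : 0 ≤ x) {p : Int × Int × Int}
    (hp : p ∈ rowA d x) : |p.1| = x := by
  obtain ⟨y, hy, hpy⟩ := List.mem_flatMap.mp hp
  exact (mem_grpA hx (PySem.List.mem_pyRange_one.mp hy).1 hpy).1

lemma outerA (d : Int) :
    ∀ (xs : List Int) (s : List (Int × Int × Int)),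
      (∀ x ∈ xs, 0 ≤ x) → xs.Nodup →
      (∀ p ∈ s, |p.1| ∉ xs) →
      xs.foldl (stepOA d) s = s ++ xs.flatMap (rowA d)
  | [], s, _, _, _ => by simp
  | x :: t, s, hnn, hnd, hs => by
    have hx : 0 ≤ x := hnn x (by simp)
    have hstep : stepOA d s x = s ++ rowA d x := by
      unfold stepOA rowA
      apply innerA d x hx
      · exact fun y hy => (PySem.List.mem_pyRange_one.mp hy).1
      · exact PySem.List.nodup_pyRange_one 0 (d + 1)
      · intro p hp h1
        exact absurd (by rw [h1]; exact List.mem_cons_self) (hs p hp)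
    rw [List.foldl_cons, hstep, List.flatMap_cons, ← List.append_assoc]
    apply outerA d t
    · exact fun z hz => hnn z (by simp [hz])
    · exact hnd.of_cons
    · intro p hp
      rcases List.mem_append.mp hp with hp | hp
      · intro hmem
        exact hs p hp (by simp [hmem])
      · rw [mem_rowA hx hp]
        exact (List.nodup_cons.mp hnd).1

lemma nodup_foldl_stepIA (d x : Int) :
    ∀ (ys : List Int) (s : List (Int × Int × Int)), s.Nodup →
      (ys.foldl (stepIA d x) s).Nodup
  | [], s, hnd => by simpa
  | y :: t, s, hnd => by
    rw [List.foldl_cons]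
    apply nodup_foldl_stepIA d x t
    rw [stepIA_eq]
    split_ifs with h
    · exact hnd
    · exact PySem.Set.nodup_add _ _ (PySem.Set.nodup_add _ _
        (PySem.Set.nodup_add _ _ (PySem.Set.nodup_add _ _ hnd)))

lemma nodup_calc_offsets (d : Int) : (calc_offsets d).Nodup := by
  unfold calc_offsets
  generalize PySem.List.pyRange 0 (d + 1) 1 = xs
  have : ∀ (l : List Int) (s : List (Int × Int × Int)), s.Nodup →
      (l.foldl (stepOA d) s).Nodup := by
    intro l
    induction l with
    | nil => intro s h; simpa
    | cons x t ih =>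
      intro s h
      rw [List.foldl_cons]
      exact ih _ (nodup_foldl_stepIA d x _ _ h)
  exact this xs PySem.Set.empty List.nodup_nil

lemma altRow_eq_rowA (d x : Int) (hx : 0 ≤ x) (hxd : x ≤ d) :
    altRow d x = rowA d x := by
  unfold altRow rowA
  rw [PySem.List.pyRange_one_append 0 (d - x + 1) (d + 1) (by omega) (by omega),
      List.flatMap_append]
  have hzero : (PySem.List.pyRange (d - x + 1) (d + 1) 1).flatMap (grpA d x) = [] := by
    apply List.flatMap_eq_nil_iff.mpr
    intro y hy
    have hb := PySem.List.mem_pyRange_one.mp hy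
    unfold grpA
    rw [if_pos (Or.inl (by rw [abs_of_nonneg hx, abs_of_nonneg (by omega : (0:Int) ≤ y)]; omega))]
  rw [hzero, List.append_nil,
      PySem.List.pyRange_one_cons (by omega : (0:Int) < d - x + 1), List.flatMap_cons]
  by_cases hx0 : x = 0
  · subst hx0
    simp only [sub_zero]
    have hg0 : grpA d 0 0 = [] := by
      unfold grpA
      rw [if_pos (Or.inr ⟨rfl, rfl⟩)]
    rw [hg0, List.nil_append]
    apply List.flatMap_congr
    intro y hy
    have hb := PySem.List.mem_pyRange_one.mp hy
    unfold grpA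
    rw [if_neg (by rw [abs_of_nonneg (by omega : (0:Int) ≤ y)]; simp; omega), if_pos rfl]
  · rw [if_neg hx0]
    have hg0 : grpA d x 0 = [(-x, 0, x), (x, 0, x)] := by
      unfold grpA
      rw [if_neg (by rw [abs_of_nonneg hx]; simp [hx0]; omega), if_neg hx0, if_pos rfl]
    rw [hg0]
    simp only [List.cons_append, List.nil_append]
    congr 1
    congr 1
    apply List.flatMap_congr
    intro y hy
    have hb := PySem.List.mem_pyRange_one.mp hy
    unfold grpA
    rw [if_neg (by rw [abs_of_nonneg hx, abs_of_nonneg (by omega : (0:Int) ≤ y)]; simp [hx0]; omega),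
        if_neg hx0, if_neg (by omega : ¬ y = 0)]

-- ===== VERDICT (by name: the statement is the Claim_ definition above) =====
theorem calc_offsets_spec : Claim_equal_calc_offsets := by
  intro d _
  unfold Spec_calc_offsets calc_offsets_alt
  have hA : calc_offsets d = (PySem.List.pyRange 0 (d + 1) 1).flatMap (rowA d) := by
    unfold calc_offsets
    have := outerA d (PySem.List.pyRange 0 (d + 1) 1) PySem.Set.empty
      (fun x hx => (PySem.List.mem_pyRange_one.mp hx).1)
      (PySem.List.nodup_pyRange_one 0 (d + 1))
      (by intro p hp; simp [PySem.Set.empty] at hp)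
    simpa [PySem.Set.empty] using this
  have hB : (PySem.List.pyRange 0 (d + 1) 1).foldl (fun rows x => rows ++ altRow d x) []
      = (PySem.List.pyRange 0 (d + 1) 1).flatMap (altRow d) := by
    simpa using PySem.List.foldl_append_eq_flatMap (altRow d) (PySem.List.pyRange 0 (d + 1) 1) []
  have hflat : (PySem.List.pyRange 0 (d + 1) 1).flatMap (altRow d)
      = (PySem.List.pyRange 0 (d + 1) 1).flatMap (rowA d) := by
    apply List.flatMap_congr
    intro x hx
    have hb := PySem.List.mem_pyRange_one.mp hx
    exact altRow_eq_rowA d x hb.1 (by omega)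
  rw [hB, hflat, PySem.Set.ofList_eq_self_of_nodup _ (hA ▸ nodup_calc_offsets d), hA]
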